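-- pv_equiv track=rewrite | github.com/h-ch22/CodingTest | 프로그래머스/0/120834. 외계행성의 나이/외계행성의 나이.py | solution
-- ===== SOURCE A (Python) =====
-- def solution(age):
--     ages = {
--         0: 'a',
--         1: 'b',
--         2: 'c',
--         3: 'd',
--         4: 'e',
--         5: 'f',
--         6: 'g',
--         7: 'h',
--         8: 'i',
--         9: 'j'
--     }
--
--     age_split = list(map(int, str(age)))
--
--     return ''.join(ages[k] for k in age_split)
-- ===== SOURCE B (Python) =====
-- def solution(age):
--     if age == 0:
--         return 'a'
--     s = ''
--     n = age
--     while n > 0: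
--         s = chr(ord('a') + n % 10) + s
--         n //= 10
--     return s
-- ===== Notes on version B (the rewrite author's own statement) =====
-- stated objective: alternative
-- what changed: Replaces the str(age) conversion plus dict lookup per digit with pure arithmetic digit extraction: a divmod loop peels digits off the number itself and prepends chr(ord('a') + digit), never building str(age), the int list or the table.
import Mathlib
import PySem

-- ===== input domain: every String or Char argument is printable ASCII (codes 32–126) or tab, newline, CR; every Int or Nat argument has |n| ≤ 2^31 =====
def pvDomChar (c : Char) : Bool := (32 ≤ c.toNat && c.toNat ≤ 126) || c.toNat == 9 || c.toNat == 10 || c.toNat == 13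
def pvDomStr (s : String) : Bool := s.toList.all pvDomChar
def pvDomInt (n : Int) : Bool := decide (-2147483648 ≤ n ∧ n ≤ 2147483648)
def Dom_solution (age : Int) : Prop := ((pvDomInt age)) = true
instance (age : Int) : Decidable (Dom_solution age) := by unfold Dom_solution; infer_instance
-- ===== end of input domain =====

-- B drops str(age) and the digit→letter dictionary entirely: it peels digits off the
-- number with a divmod loop and prepends chr(ord('a') + digit) (alternative algorithm).


-- ===== PORT A =====
-- the dict literal 'ages'
def agesDict : PySem.Dict Int String :=
  (((((((((PySem.Dict.empty.insert 0 "a").insert 1 "b").insert 2 "c").insert 3 "d").insert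
    4 "e").insert 5 "f").insert 6 "g").insert 7 "h").insert 8 "i").insert 9 "j"

-- list(map(int, str(age))) then ''.join(ages[k] …); int('-') (ValueError) and a missing
-- key (KeyError) cannot occur under Pre_, the .getD defaults are unreachable there
def solution (age : Int) : String :=
  let age_split : List (Option Int) :=
    (PySem.Int.toChars age).map (fun c => PySem.Int.ofChars? [c])
  PySem.Str.join "" (age_split.map (fun k? =>
    match k? with
    | some k => (agesDict.get? k).getD ""
    | none => ""))

-- ===== PORT B =====
-- 'while n > 0: s = chr(ord('a') + n % 10) + s; n //= 10' — on the reachable n > 0 the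
-- Nat operations n / 10, n % 10 coincide exactly with Python's // and %
def solLoop (n : Nat) (s : List Char) : List Char :=
  if n = 0 then s
  else solLoop (n / 10) (Char.ofNat ('a'.toNat + n % 10) :: s)
termination_by n
decreasing_by exact Nat.div_lt_self (Nat.pos_of_ne_zero (by assumption)) (by omega)

def solution_alt (age : Int) : String :=
  if age = 0 then "a"
  else String.ofList (solLoop age.toNat [])

-- ===== PRECONDITION & SPEC =====
-- Pre_ excludes negative age: str(age) then contains '-' and int('-') raises ValueError in A.
def Pre_solution (age : Int) : Prop := 0 ≤ age
instance (age : Int) : Decidable (Pre_solution age) := by unfold Pre_solution; infer_instance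
def pvWitness_solution : Int := (23)

def Spec_solution (age : Int) (out : String) : Prop := out = solution_alt age
instance (age : Int) (out : String) : Decidable (Spec_solution age out) := by unfold Spec_solution; infer_instance

-- ===== CLAIM =====
def Claim_equal_solution : Prop := ∀ (age : Int), Dom_solution age → Pre_solution age → Spec_solution age (solution age)

-- ===== LEMMAS AND PROOFS =====

-- digit char ↦ its letter, total on Char
def letterOf (c : Char) : Char := Char.ofNat ('a'.toNat + (c.toNat - '0'.toNat))

def digitChars : List Char := ['0','1','2','3','4','5','6','7','8','9']

lemma toDigitsCore_mem_digits (fuel : Nat) :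
    ∀ (n : Nat) (ds : List Char), (∀ c ∈ ds, c ∈ digitChars) →
      ∀ c ∈ Nat.toDigitsCore 10 fuel n ds, c ∈ digitChars := by
  induction fuel with
  | zero => intro n ds h c hc; simpa [Nat.toDigitsCore] using h c hc
  | succ f ih =>
    intro n ds h c hc
    have hd : (n % 10).digitChar ∈ digitChars := by
      have h10 : n % 10 < 10 := Nat.mod_lt _ (by omega)
      interval_cases h : (n % 10) <;> decide
    rw [Nat.toDigitsCore] at hc
    by_cases hz : n / 10 = 0
    · simp only [hz] at hc
      rcases List.mem_cons.mp hc with rfl | hmem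
      · exact hd
      · exact h c hmem
    · simp only [hz, ite_false] at hc
      refine ih (n / 10) ((n % 10).digitChar :: ds) ?_ c hc
      intro x hx
      rcases List.mem_cons.mp hx with rfl | hx'
      exacts [hd, h x hx']

lemma toChars_eq_toDigits (age : Int) (h : 0 ≤ age) :
    PySem.Int.toChars age = Nat.toDigits 10 age.toNat := by
  simp [PySem.Int.toChars, not_lt.mpr h]

lemma toChars_mem_digits (age : Int) (h : 0 ≤ age) :
    ∀ c ∈ PySem.Int.toChars age, c ∈ digitChars := by
  rw [toChars_eq_toDigits age h, Nat.toDigits]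
  exact toDigitsCore_mem_digits _ _ _ (by intro c hc; simp at hc)

-- A's per-digit table lookup equals letterOf on every digit char
lemma perChar_eq (c : Char) (h : c ∈ digitChars) :
    (match PySem.Int.ofChars? [c] with
      | some k => (agesDict.get? k).getD ""
      | none => "") = String.ofList [letterOf c] := by
  fin_cases h <;> decide

lemma join_singletons (cs : List Char) :
    PySem.Str.join "" (cs.map (fun c => String.ofList [c])) = String.ofList cs := by
  unfold PySem.Str.join
  congr 1
  simp only [List.map_map]
  have h : (String.toList ∘ fun c : Char => String.ofList [c]) = fun c : Char => [c] := by
    funext c; simp [Function.comp]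
  rw [h]
  simp [PySem.Chars.join_nil_singletons cs]

lemma toDigitsCore_succ (f n : Nat) (ds : List Char) :
    Nat.toDigitsCore 10 (f + 1) n ds =
      if n / 10 = 0 then (n % 10).digitChar :: ds
      else Nat.toDigitsCore 10 f (n / 10) ((n % 10).digitChar :: ds) := rfl

-- the divmod loop computes the letter-mapped digits of n, prepended to the accumulator
lemma solLoop_eq_map (fuel : Nat) :
    ∀ (n : Nat) (ds : List Char), 0 < n → n < fuel →
      (Nat.toDigitsCore 10 fuel n ds).map letterOf = solLoop n (ds.map letterOf) := by
  induction fuel with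
  | zero => intro n ds h hf; omega
  | succ f ih =>
    intro n ds hn hf
    have h10 : n % 10 < 10 := Nat.mod_lt _ (by omega)
    have hL : letterOf (n % 10).digitChar = Char.ofNat ('a'.toNat + n % 10) := by
      interval_cases h : (n % 10) <;> decide
    by_cases hz : n / 10 = 0
    · rw [toDigitsCore_succ, if_pos hz]
      conv_rhs => rw [solLoop]
      rw [if_neg (by omega), solLoop, if_pos hz]
      simp [hL]
    · rw [toDigitsCore_succ, if_neg hz,
        ih (n / 10) ((n % 10).digitChar :: ds) (Nat.pos_of_ne_zero hz) (by omega)]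
      conv_rhs => rw [solLoop]
      rw [if_neg (by omega)]
      simp [hL]

-- ===== VERDICT =====
theorem solution_spec : Claim_equal_solution := by
  intro age _ hpre
  have hge : (0 : Int) ≤ age := hpre
  unfold Spec_solution solution
  simp only [List.map_map]
  have hmap : List.map
      ((fun k? => match k? with
        | some k => (agesDict.get? k).getD ""
        | none => "") ∘ fun c => PySem.Int.ofChars? [c]) (PySem.Int.toChars age)
      = List.map (fun c => String.ofList [c]) ((PySem.Int.toChars age).map letterOf) := by
    rw [List.map_map]
    refine List.map_congr_left ?_
    intro c hc
    simpa [Function.comp] using perChar_eq c (toChars_mem_digits age hge c hc)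
  rw [hmap, join_singletons, toChars_eq_toDigits age hge]
  by_cases h0 : age = 0
  · subst h0; decide
  · have hn : 0 < age.toNat := by omega
    unfold solution_alt
    rw [if_neg h0, Nat.toDigits,
      solLoop_eq_map (age.toNat + 1) age.toNat [] hn (by omega)]
    simp
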